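-- pv_equiv track=rewrite | github.com/Namkyeong/PolySRL_AI4Science | layers/PCME.py | full_sampling
-- ===== SOURCE A (Python) =====
-- def full_sampling(N):
--     candidates = []
--     selected = []
--     matched = []
--     for i in range(N):
--         for j in range(N):
--             candidates.append(i) # 0 0 0 0 1 1 1 1
--             selected.append(j)   # 0 1 2 3 0 1 2 3
--             if i == j:           # 1 0 0 0 0 1 0 0
--                 matched.append(1)
--             else:
--                 matched.append(-1)
--     return candidates, selected, matched
-- ===== SOURCE B (Python) =====
-- def full_sampling(N):
--     # Flat index arithmetic over the NxN grid: k-th cell is (k // N, k % N),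
--     # and the diagonal cells are exactly the multiples of N + 1.
--     total = max(N, 0) ** 2
--     candidates = [k // N for k in range(total)]
--     selected = [k % N for k in range(total)]
--     matched = [1 if k % (N + 1) == 0 else -1 for k in range(total)]
--     return candidates, selected, matched
-- ===== Notes on version B (the rewrite author's own statement) =====
-- stated objective: alternative
-- what changed: B replaces A's nested loops and per-cell equality branch with flat index arithmetic over a single range of N*N cells: each flat index yields its candidate by floor division and its selection by remainder, and the matched hit flag is placed exactly at the flat indices divisible by N+1 (the diagonal).
import Mathlib
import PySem

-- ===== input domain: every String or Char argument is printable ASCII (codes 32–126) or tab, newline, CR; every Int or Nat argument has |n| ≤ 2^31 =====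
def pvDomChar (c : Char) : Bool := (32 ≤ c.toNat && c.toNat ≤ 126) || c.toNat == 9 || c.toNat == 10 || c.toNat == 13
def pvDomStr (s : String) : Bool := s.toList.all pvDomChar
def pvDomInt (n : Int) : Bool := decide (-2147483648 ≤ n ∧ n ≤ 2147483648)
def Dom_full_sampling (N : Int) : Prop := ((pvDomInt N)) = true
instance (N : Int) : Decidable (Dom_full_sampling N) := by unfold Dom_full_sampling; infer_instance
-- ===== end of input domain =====

-- B replaces A's nested loops by flat index arithmetic over one range(N*N):
-- cell k is (k // N, k % N) and the diagonal is exactly the multiples of N + 1.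

-- ===== PORT A =====
def full_sampling (N : Int) : List Int × List Int × List Int :=
  (PySem.List.pyRange 0 N 1).foldl (fun acc i =>
    (PySem.List.pyRange 0 N 1).foldl (fun acc2 j =>
      (acc2.1 ++ [i], acc2.2.1 ++ [j],
       acc2.2.2 ++ [if i = j then (1 : Int) else -1])) acc)
    ([], [], [])

-- ===== PORT B =====
def full_sampling_alt (N : Int) : List Int × List Int × List Int :=
  let total := (max N 0) ^ 2
  let candidates := (PySem.List.pyRange 0 total 1).map (fun k => PySem.Int.floordiv k N)
  let selected := (PySem.List.pyRange 0 total 1).map (fun k => PySem.Int.mod k N)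
  let matched := (PySem.List.pyRange 0 total 1).map
    (fun k => if PySem.Int.mod k (N + 1) = 0 then (1 : Int) else -1)
  (candidates, selected, matched)

-- ===== PRECONDITION & SPEC =====
def Spec_full_sampling (N : Int) (out : List Int × List Int × List Int) : Prop := out = full_sampling_alt N
instance (N : Int) (out : List Int × List Int × List Int) : Decidable (Spec_full_sampling N out) := by unfold Spec_full_sampling; infer_instance

-- ===== CLAIM (what is proved, stated in full; the proofs are below) =====
def Claim_equal_full_sampling : Prop := ∀ (N : Int), Dom_full_sampling N → Spec_full_sampling N (full_sampling N)

-- ===== LEMMAS AND PROOFS =====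

-- A's inner loop: appends i n times, the range once, and one matched row
theorem pv_inner (l : List Int) (i : Int) (c s m : List Int) :
    l.foldl (fun acc2 j =>
      (acc2.1 ++ [i], acc2.2.1 ++ [j],
       acc2.2.2 ++ [if i = j then (1 : Int) else -1])) (c, s, m)
    = (c ++ l.map (fun _ => i), s ++ l,
       m ++ l.map (fun j => if i = j then (1 : Int) else -1)) := by
  induction l generalizing c s m with
  | nil => simp
  | cons x xs ih => simp [List.foldl_cons, ih]

-- A's outer loop as flatMaps
theorem pv_outer (l r : List Int) (c s m : List Int) :
    l.foldl (fun acc i =>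
      r.foldl (fun acc2 j =>
        (acc2.1 ++ [i], acc2.2.1 ++ [j],
         acc2.2.2 ++ [if i = j then (1 : Int) else -1])) acc) (c, s, m)
    = (c ++ l.flatMap (fun i => r.map (fun _ => i)), s ++ l.flatMap (fun _ => r),
       m ++ l.flatMap (fun i => r.map (fun j => if i = j then (1 : Int) else -1))) := by
  induction l generalizing c s m with
  | nil => simp
  | cons x xs ih => simp [List.foldl_cons, pv_inner, ih]

-- quotients over one flattened row block
theorem pv_cand (n : Nat) : ∀ m : Nat,
    (List.range (m * n)).map (fun k => ((k / n : Nat) : Int))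
    = (List.range m).flatMap (fun i => (List.range n).map (fun _ => ((i : Nat) : Int))) := by
  intro m
  induction m with
  | zero => simp
  | succ m ih =>
    rw [Nat.succ_mul, List.range_add, List.map_append, ih, List.range_succ,
      List.flatMap_append]
    simp only [List.flatMap_cons, List.flatMap_nil, List.append_nil, List.map_map]
    congr 1
    apply List.map_congr_left
    intro j hj
    have hjn : j < n := List.mem_range.mp hj
    have hn : 0 < n := by omega
    simp [Function.comp, Nat.mul_comm m n, Nat.mul_add_div hn, Nat.div_eq_of_lt hjn]

-- remainders over one flattened row block
theorem pv_sel (n : Nat) : ∀ m : Nat,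
    (List.range (m * n)).map (fun k => ((k % n : Nat) : Int))
    = (List.range m).flatMap (fun _ => (List.range n).map (fun j => ((j : Nat) : Int))) := by
  intro m
  induction m with
  | zero => simp
  | succ m ih =>
    rw [Nat.succ_mul, List.range_add, List.map_append, ih, List.range_succ,
      List.flatMap_append]
    simp only [List.flatMap_cons, List.flatMap_nil, List.append_nil, List.map_map]
    congr 1
    apply List.map_congr_left
    intro j hj
    have hjn : j < n := List.mem_range.mp hj
    simp [Function.comp, Nat.mul_comm m n, Nat.mod_eq_of_lt hjn]

-- the diagonal cells are exactly the multiples of n + 1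
theorem pv_diag (n m j : Nat) (hm : m < n) (hj : j < n) :
    (m * n + j) % (n + 1) = 0 ↔ m = j := by
  constructor
  · intro h
    obtain ⟨c, hc⟩ := Nat.dvd_of_mod_eq_zero h
    have e1 : (n + 1) * (m + 1) = m * n + m + n + 1 := by ring
    have e2 : (n + 1) * (c + 1) = (n + 1) * c + n + 1 := by ring
    have hc1 : c < m + 1 := Nat.lt_of_mul_lt_mul_left (a := n + 1) (by omega)
    have hc2 : m < c + 1 := Nat.lt_of_mul_lt_mul_left (a := n + 1) (by
      have e3 : (n + 1) * m = m * n + m := by ring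
      omega)
    have hcm : c = m := by omega
    subst hcm
    have e4 : (n + 1) * c = c * n + c := by ring
    omega
  · intro h
    subst h
    have e : m * n + m = (n + 1) * m := by ring
    rw [e, Nat.mul_mod_right]

-- matched flags over one flattened row block
theorem pv_match (n : Nat) : ∀ m : Nat, m ≤ n →
    (List.range (m * n)).map (fun k => if k % (n + 1) = 0 then (1 : Int) else -1)
    = (List.range m).flatMap (fun i => (List.range n).map
        (fun j => if ((i : Nat) : Int) = ((j : Nat) : Int) then (1 : Int) else -1)) := by
  intro m
  induction m with
  | zero => simp
  | succ m ih =>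
    intro hm
    rw [Nat.succ_mul, List.range_add, List.map_append, ih (by omega), List.range_succ,
      List.flatMap_append]
    simp only [List.flatMap_cons, List.flatMap_nil, List.append_nil, List.map_map]
    congr 1
    apply List.map_congr_left
    intro j hj
    have hjn : j < n := List.mem_range.mp hj
    have hprop : ((m * n + j) % (n + 1) = 0) ↔ (((m : Nat) : Int) = ((j : Nat) : Int)) :=
      (pv_diag n m j (by omega) hjn).trans Nat.cast_inj.symm
    simp only [Function.comp, hprop]

theorem pv_main (N : Int) : full_sampling N = full_sampling_alt N := by
  unfold full_sampling full_sampling_alt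
  rw [pv_outer]
  simp only [List.nil_append]
  have hmax : max N 0 = (N.toNat : Int) := by omega
  have htot : (max N 0) ^ 2 = ((N.toNat * N.toNat : Nat) : Int) := by
    rw [hmax]; push_cast; ring
  rw [htot, PySem.List.pyRange_zero_nat, PySem.List.pyRange_zero]
  by_cases hN : 0 < N
  · obtain ⟨n, rfl⟩ : ∃ n : Nat, N = (n : Int) := ⟨N.toNat, (Int.toNat_of_nonneg hN.le).symm⟩
    simp only [Int.toNat_natCast]
    refine congrArg₂ Prod.mk ?_ (congrArg₂ Prod.mk ?_ ?_)
    · rw [List.flatMap_map, List.map_map]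
      simp only [List.map_map, Function.comp_def, PySem.Int.floordiv_natCast]
      exact (pv_cand n n).symm
    · rw [List.flatMap_map, List.map_map]
      simp only [Function.comp_def, PySem.Int.mod_natCast]
      exact (pv_sel n n).symm
    · rw [List.flatMap_map, List.map_map]
      have hcast : (n : Int) + 1 = ((n + 1 : Nat) : Int) := by omega
      simp only [List.map_map, Function.comp_def, hcast, PySem.Int.mod_natCast, Nat.cast_eq_zero]
      exact (pv_match n n le_rfl).symm
  · have h0 : N.toNat = 0 := by omega
    simp [h0]

-- ===== VERDICT (by name: the statement is the Claim_ definition above) =====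
theorem full_sampling_spec : Claim_equal_full_sampling := by
  intro N _
  unfold Spec_full_sampling
  exact pv_main N
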